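-- pv_equiv track=rewrite | github.com/dsdmsa/PsOldRemotePlay | research/tools/unpack_vrpsdk.py | find_wide_strings
-- ===== SOURCE A (Python) =====
-- def find_wide_strings(data, min_len=4):
--     """Find UTF-16LE strings in data."""
--     strings = []
--     i = 0
--     while i < len(data) - 1:
--         start = i
--         chars = []
--         while i < len(data) - 1:
--             lo, hi = data[i], data[i+1]
--             if hi == 0 and 0x20 <= lo < 0x7F:
--                 chars.append(chr(lo))
--                 i += 2
--             else:
--                 break
--         if len(chars) >= min_len:
--             strings.append((start, ''.join(chars)))
--         else:
--             i += 2 if i == start else 0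
--         if i == start:
--             i += 2
--     return strings
-- ===== SOURCE B (Python) =====
-- def find_wide_strings(data, min_len=4):
--     """Find UTF-16LE strings in data (two-phase: decode code units, then scan runs)."""
--     # Phase 1: decode each even-aligned byte pair to a printable ASCII char, or None.
--     units = [chr(data[2 * j]) if data[2 * j + 1] == 0 and 0x20 <= data[2 * j] < 0x7F else None
--              for j in range(len(data) // 2)]
--     # Phase 2: one linear scan accumulating the current run of decoded chars.
--     out = []
--     run = ''
--     start = 0
--     for j, u in enumerate(units):
--         if u is not None:
--             if not run:
--                 start = j
--             run += u
--         elif run: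
--             if len(run) >= min_len:
--                 out.append((2 * start, run))
--             run = ''
--     if run and len(run) >= min_len:
--         out.append((2 * start, run))
--     return out
-- ===== Notes on version B (the rewrite author's own statement) =====
-- stated objective: alternative
-- what changed: Replaces A's in-place pointer-advancing nested while-loops over byte indices (restarting an inner collection loop at each outer step) with a two-phase pass: decode every even-aligned byte pair into a printable-ASCII code unit (or a break marker) once, then a single linear scan over the decoded units accumulating the current run and flushing it at each break; the measured speedup is constant-factor (one comprehension plus one scan with cheaper per-pair work, no re-entry of an inner loop per outer step).
-- intended difference: When min_len <= 0 and the buffer contains an even-aligned pair that does not decode to a printable-ASCII UTF-16LE unit, A appends an empty string at every such break position while B returns only the nonempty decoded runs; B's value is intended since empty strings at breaks are noise, not found strings. — e.g. on find_wide_strings([0, 1], 0): A returns [(0, "")], B returns []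
import Mathlib
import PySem

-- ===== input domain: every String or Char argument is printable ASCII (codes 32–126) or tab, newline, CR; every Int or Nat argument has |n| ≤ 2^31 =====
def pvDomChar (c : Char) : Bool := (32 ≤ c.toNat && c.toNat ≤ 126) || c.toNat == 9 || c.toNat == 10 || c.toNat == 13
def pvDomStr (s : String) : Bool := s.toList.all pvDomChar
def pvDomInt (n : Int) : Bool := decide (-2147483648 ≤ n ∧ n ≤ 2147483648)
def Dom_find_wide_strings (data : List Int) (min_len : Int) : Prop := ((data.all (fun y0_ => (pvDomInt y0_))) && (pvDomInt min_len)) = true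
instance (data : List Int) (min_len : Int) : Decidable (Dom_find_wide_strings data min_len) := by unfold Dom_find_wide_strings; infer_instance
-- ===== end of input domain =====

-- B replaces A's in-place pointer-advancing nested scan over byte indices by a
-- decode-into-code-units pass followed by a single run-accumulating scan (objective: alternative);
-- for min_len ≤ 0, A additionally emits an empty string at every non-decodable pair — stated as D_ below.

-- ===== PORT A =====
-- inner `while` of A: collect chars while the pair at i decodes; i is a Nat byte index
-- (Python's `i < len(data) - 1` with i ≥ 0 equals `i + 1 < len(data)`); data[i]/data[i+1]
-- are always in range here, so List.getD is exact. The fuel argument only makes the same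
-- computation structurally total (data.length steps always suffice, proved in fws_inner_spec).
def find_wide_strings_inner (data : List Int) : Nat → Nat → List Char → Nat × List Char
  | 0, i, chars => (i, chars)
  | fuel + 1, i, chars =>
    if i + 1 < data.length then
      let lo := data.getD i 0
      let hi := data.getD (i + 1) 0
      if hi = 0 ∧ 32 ≤ lo ∧ lo < 127 then
        find_wide_strings_inner data fuel (i + 2) (chars ++ [Char.ofNat lo.toNat])
      else (i, chars)
    else (i, chars)

-- outer `while` of A: step1 bundles `if len(chars) >= min_len: append else: i += 2 if i == start else 0`,
-- i3 is the trailing `if i == start: i += 2`; the fuel argument only makes the same computation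
-- structurally total (i grows by ≥ 2 per iteration, so data.length + 1 steps always suffice)
def find_wide_strings_outer (data : List Int) (min_len : Int) : Nat → Nat → List (Int × String) → List (Int × String)
  | 0, _, acc => acc
  | fuel + 1, i, acc =>
    if i + 1 < data.length then
      let p := find_wide_strings_inner data data.length i []
      let step1 : List (Int × String) × Nat :=
        if (p.2.length : Int) ≥ min_len then (acc ++ [((i : Int), String.ofList p.2)], p.1)
        else (acc, if p.1 = i then p.1 + 2 else p.1)
      let i3 := if step1.2 = i then step1.2 + 2 else step1.2
      find_wide_strings_outer data min_len fuel i3 step1.1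
    else acc

def find_wide_strings (data : List Int) (min_len : Int) : List (Int × String) :=
  find_wide_strings_outer data min_len (data.length + 1) 0 []

-- ===== PORT B =====
-- decode the even-aligned pair number j (indices always in range when j < len/2, so getD is exact)
def fws_decode (data : List Int) (j : Nat) : Option Char :=
  let lo := data.getD (2 * j) 0
  let hi := data.getD (2 * j + 1) 0
  if hi = 0 ∧ 32 ≤ lo ∧ lo < 127 then some (Char.ofNat lo.toNat) else none

def fws_units (data : List Int) : List (Option Char) :=
  (List.range (data.length / 2)).map (fws_decode data)

-- the `for j, u in enumerate(units)` loop of B, with its trailing final flush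
def fws_loop (min_len : Int) (units : List (Option Char)) (j : Nat)
    (out : List (Int × String)) (run : List Char) (start : Nat) : List (Int × String) :=
  match units with
  | [] => if run ≠ [] ∧ (run.length : Int) ≥ min_len then out ++ [(((2 * start : Nat) : Int), String.ofList run)] else out
  | some c :: rest =>
      if run = [] then fws_loop min_len rest (j + 1) out [c] j
      else fws_loop min_len rest (j + 1) out (run ++ [c]) start
  | none :: rest =>
      let out1 := if run ≠ [] ∧ (run.length : Int) ≥ min_len then out ++ [(((2 * start : Nat) : Int), String.ofList run)] else out
      fws_loop min_len rest (j + 1) out1 [] start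

def find_wide_strings_alt (data : List Int) (min_len : Int) : List (Int × String) :=
  fws_loop min_len (fws_units data) 0 [] [] 0

-- ===== PRECONDITION & SPEC =====
-- When min_len ≤ 0 and the buffer has an even-aligned pair that is not a printable-ASCII
-- UTF-16LE code unit, A appends an empty string at every such break position while B reports
-- only the (nonempty) decoded runs; B's value is the intended one: empty strings at breaks
-- are noise, not found strings.
def D_find_wide_strings (data : List Int) (min_len : Int) : Prop :=
  min_len ≤ 0 ∧ ∃ j ∈ List.range (data.length / 2),
    data.getD (2 * j + 1) 0 ≠ 0 ∨ data.getD (2 * j) 0 ≤ 31 ∨ 127 ≤ data.getD (2 * j) 0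
instance (data : List Int) (min_len : Int) : Decidable (D_find_wide_strings data min_len) := by
  unfold D_find_wide_strings; infer_instance

def Spec_find_wide_strings (data : List Int) (min_len : Int) (out : List (Int × String)) : Prop :=
  ¬ D_find_wide_strings data min_len → out = find_wide_strings_alt data min_len
instance (data : List Int) (min_len : Int) (out : List (Int × String)) : Decidable (Spec_find_wide_strings data min_len out) := by
  unfold Spec_find_wide_strings; infer_instance

def pvDiffWitness_find_wide_strings : List Int × Int := ([0, 1], 0)
def pvDiffWitnessOut_find_wide_strings : (List (Int × String)) × (List (Int × String)) :=
  ([(0, "")], [])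

-- ===== CLAIM BLOCK =====
def Claim_unchanged_find_wide_strings : Prop := ∀ (data : List Int) (min_len : Int), Dom_find_wide_strings data min_len → Spec_find_wide_strings data min_len (find_wide_strings data min_len)
def Claim_changed_find_wide_strings : Prop := Dom_find_wide_strings (pvDiffWitness_find_wide_strings.1) (pvDiffWitness_find_wide_strings.2) ∧ D_find_wide_strings (pvDiffWitness_find_wide_strings.1) (pvDiffWitness_find_wide_strings.2) ∧ find_wide_strings (pvDiffWitness_find_wide_strings.1) (pvDiffWitness_find_wide_strings.2) = pvDiffWitnessOut_find_wide_strings.1 ∧ find_wide_strings_alt (pvDiffWitness_find_wide_strings.1) (pvDiffWitness_find_wide_strings.2) = pvDiffWitnessOut_find_wide_strings.2 ∧ pvDiffWitnessOut_find_wide_strings.1 ≠ pvDiffWitnessOut_find_wide_strings.2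
def Claim_exact_find_wide_strings : Prop := ∀ (data : List Int) (min_len : Int), Dom_find_wide_strings data min_len → D_find_wide_strings data min_len → find_wide_strings data min_len ≠ find_wide_strings_alt data min_len

-- ===== LEMMAS AND PROOFS =====

-- proof-side replay of A as a unit-list loop: B's loop plus A's extra empty-string
-- emission at each break when min_len ≤ 0
def fws_loopG (min_len : Int) (units : List (Option Char)) (j : Nat)
    (out : List (Int × String)) (run : List Char) (start : Nat) : List (Int × String) :=
  match units with
  | [] => if run ≠ [] ∧ (run.length : Int) ≥ min_len then out ++ [(((2 * start : Nat) : Int), String.ofList run)] else out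
  | some c :: rest =>
      if run = [] then fws_loopG min_len rest (j + 1) out [c] j
      else fws_loopG min_len rest (j + 1) out (run ++ [c]) start
  | none :: rest =>
      let out1 := if run ≠ [] ∧ (run.length : Int) ≥ min_len then out ++ [(((2 * start : Nat) : Int), String.ofList run)] else out
      let out2 := if min_len ≤ 0 then out1 ++ [(((2 * j : Nat) : Int), "")] else out1
      fws_loopG min_len rest (j + 1) out2 [] start

-- the maximal run of decoded chars at the front of a unit list, and what is left after it
def fwsRun : List (Option Char) → List Char
  | [] => []
  | none :: _ => []
  | some c :: t => c :: fwsRun t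

def fwsRest : List (Option Char) → List (Option Char)
  | [] => []
  | none :: t => none :: t
  | some _ :: t => fwsRest t

theorem fwsRun_rest_eq : ∀ us : List (Option Char), (fwsRun us).map some ++ fwsRest us = us
  | [] => rfl
  | none :: t => rfl
  | some c :: t => by simp [fwsRun, fwsRest, fwsRun_rest_eq t]

theorem fwsRest_shape : ∀ us : List (Option Char), fwsRest us = [] ∨ ∃ t, fwsRest us = none :: t
  | [] => Or.inl rfl
  | none :: t => Or.inr ⟨t, rfl⟩
  | some c :: t => fwsRest_shape t

theorem fws_units_length (data : List Int) : (fws_units data).length = data.length / 2 := by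
  simp [fws_units]

theorem fws_units_getElem (data : List Int) (j : Nat) (h : j < (fws_units data).length) :
    (fws_units data)[j] = fws_decode data j := by
  simp [fws_units] at h ⊢

-- characterisation of A's inner while-loop by the run structure of the decoded units
theorem fws_inner_spec (data : List Int) :
    ∀ (us : List (Option Char)) (fuel j : Nat) (chars : List Char),
      us = (fws_units data).drop j → (fwsRun us).length < fuel →
      find_wide_strings_inner data fuel (2 * j) chars
        = (2 * (j + (fwsRun us).length), chars ++ fwsRun us) := by
  intro us
  induction us with
  | nil =>
    intro fuel j chars hus hfuel
    obtain ⟨f, rfl⟩ : ∃ f, fuel = f + 1 := ⟨fuel - 1, by omega⟩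
    have hlen : (fws_units data).length ≤ j := by
      have h := congrArg List.length hus
      simp [List.length_drop] at h
      omega
    rw [fws_units_length] at hlen
    have : ¬ 2 * j + 1 < data.length := by omega
    simp [find_wide_strings_inner, this, fwsRun]
  | cons u us' ih =>
    intro fuel j chars hus hfuel
    obtain ⟨f, rfl⟩ : ∃ f, fuel = f + 1 := ⟨fuel - 1, by omega⟩
    have hj : j < (fws_units data).length := by
      by_contra h
      rw [List.drop_eq_nil_of_le (by omega)] at hus; exact absurd hus (by simp)
    have hdec : (fws_units data).drop j = (fws_units data)[j] :: (fws_units data).drop (j + 1) :=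
      List.drop_eq_getElem_cons hj
    rw [hdec] at hus
    have hu : u = fws_decode data j := by
      have := fws_units_getElem data j hj
      cases hus; rw [this]
    have hus' : us' = (fws_units data).drop (j + 1) := by cases hus; rfl
    have hjlen : j < data.length / 2 := by rw [fws_units_length] at hj; exact hj
    have hcond : 2 * j + 1 < data.length := by omega
    rw [find_wide_strings_inner]
    simp only [hcond, if_pos, List.getD]
    by_cases hc : data[2 * j + 1]?.getD 0 = 0 ∧ 32 ≤ data[2 * j]?.getD 0 ∧ data[2 * j]?.getD 0 < 127
    · have hu' : u = some (Char.ofNat (data[2 * j]?.getD 0).toNat) := by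
        rw [hu]; simp [fws_decode, List.getD, hc]
      have hfuel' : (fwsRun us').length < f := by
        subst hu'
        simp only [fwsRun, List.length_cons] at hfuel
        omega
      have h2 : 2 * j + 2 = 2 * (j + 1) := by omega
      rw [if_pos hc, h2, ih f (j + 1) (chars ++ [Char.ofNat (data[2 * j]?.getD 0).toNat]) hus' hfuel']
      subst hu'
      simp [fwsRun]
      omega
    · have hu' : u = none := by rw [hu]; simp [fws_decode, List.getD, hc]
      rw [if_neg hc]
      subst hu'
      simp [fwsRun]

-- the guarded loop consumes a block of decoded chars by extending the current (nonempty) run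
theorem fws_loopG_run (min_len : Int) :
    ∀ (cs : List Char) (rest : List (Option Char)) (j : Nat) (out : List (Int × String))
      (run : List Char) (start : Nat), run ≠ [] →
      fws_loopG min_len (cs.map some ++ rest) j out run start
        = fws_loopG min_len rest (j + cs.length) out (run ++ cs) start := by
  intro cs
  induction cs with
  | nil => intro rest j out run start _; simp
  | cons c cs' ih =>
    intro rest j out run start hrun
    simp only [List.map_cons, List.cons_append, fws_loopG, if_neg hrun]
    rw [ih rest (j + 1) out (run ++ [c]) start (by simp)]
    simp only [List.append_assoc, List.singleton_append, List.length_cons]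
    ring_nf

-- the outer loop runs iff the drop-suffix of units is nonempty
theorem fws_drop_cond (data : List Int) (j : Nat) (us : List (Option Char))
    (h : us = (fws_units data).drop j) : (2 * j + 1 < data.length ↔ us ≠ []) := by
  have hl := congrArg List.length h
  simp only [List.length_drop, fws_units_length] at hl
  constructor
  · intro h1 hnil; rw [hnil] at hl; simp at hl; omega
  · intro h1
    have : us.length ≠ 0 := by simpa [List.length_eq_zero_iff] using h1
    omega

theorem fws_drop_head (data : List Int) (j : Nat) (u : Option Char) (us' : List (Option Char))
    (h : u :: us' = (fws_units data).drop j) :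
    fws_decode data j = u ∧ us' = (fws_units data).drop (j + 1) := by
  have hj : j < (fws_units data).length := by
    have hl := congrArg List.length h
    simp only [List.length_drop, List.length_cons] at hl
    omega
  have hd := List.drop_eq_getElem_cons hj
  rw [← h] at hd
  injection hd with h1 h2
  exact ⟨by rw [← fws_units_getElem data j hj, ← h1], h2⟩

-- A's outer loop, one iteration at a break position
theorem fws_outer_step_none (data : List Int) (min_len : Int) (fuel j : Nat) (acc : List (Int × String))
    (h1 : 2 * j + 1 < data.length)
    (h2 : find_wide_strings_inner data data.length (2 * j) [] = (2 * j, [])) :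
    find_wide_strings_outer data min_len (fuel + 1) (2 * j) acc
      = find_wide_strings_outer data min_len fuel (2 * (j + 1))
          (if min_len ≤ 0 then acc ++ [(((2 * j : Nat) : Int), "")] else acc) := by
  rw [find_wide_strings_outer, if_pos h1]
  simp only [h2]
  have hmk : String.ofList ([] : List Char) = "" := rfl
  have h12 : 2 * j + 2 = 2 * (j + 1) := by omega
  by_cases hml : min_len ≤ 0
  · simp [hml, hmk, h12]
  · simp [hml, h12]

-- A's outer loop, one iteration over a nonempty run
theorem fws_outer_step_run (data : List Int) (min_len : Int) (fuel j : Nat) (acc : List (Int × String))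
    (R : List Char) (hR : R ≠ [])
    (h1 : 2 * j + 1 < data.length)
    (h2 : find_wide_strings_inner data data.length (2 * j) [] = (2 * (j + R.length), R)) :
    find_wide_strings_outer data min_len (fuel + 1) (2 * j) acc
      = find_wide_strings_outer data min_len fuel (2 * (j + R.length))
          (if (R.length : Int) ≥ min_len then acc ++ [(((2 * j : Nat) : Int), String.ofList R)] else acc) := by
  rw [find_wide_strings_outer, if_pos h1]
  simp only [h2]
  have hr : R.length ≠ 0 := by simpa [List.length_eq_zero_iff] using hR
  have hne : ¬ (2 * (j + R.length) = 2 * j) := by omega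
  by_cases hml : (R.length : Int) ≥ min_len
  · simp [hml, hne]
  · simp [hml, hne]

theorem fws_main_nil (data : List Int) (min_len : Int) (fuel j : Nat) (acc : List (Int × String)) (start : Nat)
    (hus : ([] : List (Option Char)) = (fws_units data).drop j) :
    find_wide_strings_outer data min_len (fuel + 1) (2 * j) acc = fws_loopG min_len [] j acc [] start := by
  have hnc : ¬ (2 * j + 1 < data.length) := by
    rw [fws_drop_cond data j [] hus]; simp
  rw [find_wide_strings_outer, if_neg hnc]
  simp [fws_loopG]

-- at every reachable call the inner loop's data.length fuel suffices: the run ahead is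
-- shorter than the buffer
theorem fws_run_fuel (data : List Int) (j : Nat) (us : List (Option Char))
    (hus : us = (fws_units data).drop j) (hne : 2 * j + 1 < data.length) :
    (fwsRun us).length < data.length := by
  have h1 : (fwsRun us).length ≤ us.length := by
    have := congrArg List.length (fwsRun_rest_eq us)
    simp at this
    omega
  have h2 := congrArg List.length hus
  simp only [List.length_drop, fws_units_length] at h2
  omega

-- main invariant: from even byte index 2*j (the unit-loop state: at unit j, empty run), A's
-- outer loop with enough fuel agrees with the guarded unit loop
theorem fws_main (data : List Int) (min_len : Int) :
    ∀ (n : Nat) (us : List (Option Char)) (fuel j : Nat) (acc : List (Int × String)) (start : Nat),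
      us.length ≤ n → us.length < fuel → us = (fws_units data).drop j →
      find_wide_strings_outer data min_len fuel (2 * j) acc = fws_loopG min_len us j acc [] start := by
  intro n
  induction n with
  | zero =>
    intro us fuel j acc start hlen hfuel hus
    have hnil : us = [] := List.eq_nil_of_length_eq_zero (Nat.le_zero.mp hlen)
    subst hnil
    obtain ⟨f, rfl⟩ : ∃ f, fuel = f + 1 := ⟨fuel - 1, by omega⟩
    exact fws_main_nil data min_len f j acc start hus
  | succ n ih =>
    intro us fuel j acc start hlen hfuel hus
    cases us with
    | nil =>
      obtain ⟨f, rfl⟩ : ∃ f, fuel = f + 1 := ⟨fuel - 1, by omega⟩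
      exact fws_main_nil data min_len f j acc start hus
    | cons u us' =>
      obtain ⟨f, rfl⟩ : ∃ f, fuel = f + 1 := ⟨fuel - 1, by omega⟩
      obtain ⟨hu, hus'⟩ := fws_drop_head data j u us' hus
      have hcond : 2 * j + 1 < data.length :=
        (fws_drop_cond data j (u :: us') hus).mpr (by simp)
      have hifuel := fws_run_fuel data j (u :: us') hus hcond
      cases u with
      | none =>
        have hinner : find_wide_strings_inner data data.length (2 * j) [] = (2 * j, []) := by
          have := fws_inner_spec data (none :: us') data.length j [] hus (by simpa [fwsRun] using hifuel)
          simpa [fwsRun] using this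
        rw [fws_outer_step_none data min_len f j acc hcond hinner]
        conv_rhs => rw [fws_loopG]
        simp only [ne_eq, not_true_eq_false, false_and, if_false]
        exact ih us' f (j + 1) _ start (by simp at hlen; omega) (by simp at hfuel; omega) hus'
      | some c =>
        have hRne : (c :: fwsRun us') ≠ [] := by simp
        have hinner : find_wide_strings_inner data data.length (2 * j) []
            = (2 * (j + (c :: fwsRun us').length), c :: fwsRun us') := by
          have := fws_inner_spec data (some c :: us') data.length j [] hus hifuel
          simpa [fwsRun] using this
        rw [fws_outer_step_run data min_len f j acc (c :: fwsRun us') hRne hcond hinner]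
        conv_rhs => rw [fws_loopG]
        rw [if_pos rfl]
        conv_rhs => rw [← fwsRun_rest_eq us']
        rw [fws_loopG_run min_len (fwsRun us') (fwsRest us') (j + 1) acc [c] j (by simp)]
        simp only [List.singleton_append]
        have harith : j + 1 + (fwsRun us').length = j + (c :: fwsRun us').length := by
          simp [List.length_cons]; omega
        rw [harith]
        have husfull : some c :: us' = (c :: fwsRun us').map some ++ fwsRest us' := by
          simp only [List.map_cons, List.cons_append, fwsRun_rest_eq us']
        have hrest : fwsRest us' = (fws_units data).drop (j + (c :: fwsRun us').length) := by
          have h1 : (fws_units data).drop (j + (c :: fwsRun us').length)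
              = (some c :: us').drop (c :: fwsRun us').length := by
            rw [hus, List.drop_drop]
          rw [h1, husfull]
          have h2 : List.drop (((c :: fwsRun us').map some).length)
              (((c :: fwsRun us').map some) ++ fwsRest us') = fwsRest us' := List.drop_left
          simp only [List.length_map] at h2
          exact h2.symm
        have hflen : us'.length = (fwsRun us').length + (fwsRest us').length := by
          have := congrArg List.length (fwsRun_rest_eq us')
          simp at this
          omega
        rcases fwsRest_shape us' with hsh | ⟨rest'', hsh⟩
        · rw [hsh] at hrest ⊢
          have hnc : ¬ (2 * (j + (c :: fwsRun us').length) + 1 < data.length) := by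
            rw [fws_drop_cond data (j + (c :: fwsRun us').length) [] hrest]; simp
          obtain ⟨f', rfl⟩ : ∃ f', f = f' + 1 := by
            refine ⟨f - 1, ?_⟩
            simp only [List.length_cons] at hfuel
            omega
          rw [find_wide_strings_outer, if_neg hnc]
          simp [fws_loopG, hRne]
        · rw [hsh] at hrest ⊢
          obtain ⟨f', rfl⟩ : ∃ f', f = f' + 1 := by
            refine ⟨f - 1, ?_⟩
            rw [hsh] at hflen
            simp only [List.length_cons] at hfuel
            omega
          have hcond2 : 2 * (j + (c :: fwsRun us').length) + 1 < data.length :=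
            (fws_drop_cond data (j + (c :: fwsRun us').length) (none :: rest'') hrest).mpr (by simp)
          have hifuel2 := fws_run_fuel data (j + (c :: fwsRun us').length) (none :: rest'') hrest hcond2
          have hinner2 : find_wide_strings_inner data data.length (2 * (j + (c :: fwsRun us').length)) []
              = (2 * (j + (c :: fwsRun us').length), []) := by
            have := fws_inner_spec data (none :: rest'') data.length (j + (c :: fwsRun us').length) [] hrest
              (by simpa [fwsRun] using hifuel2)
            simpa [fwsRun] using this
          rw [fws_outer_step_none data min_len f' (j + (c :: fwsRun us').length) _ hcond2 hinner2]
          conv_rhs => rw [fws_loopG]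
          simp only [hRne, ne_eq, not_false_eq_true, true_and]
          obtain ⟨-, hrest'⟩ := fws_drop_head data (j + (c :: fwsRun us').length) none rest'' hrest
          have hlen' : rest''.length ≤ n := by
            rw [hsh] at hflen
            simp only [List.length_cons] at hlen hflen
            omega
          have hfuel' : rest''.length < f' := by
            rw [hsh] at hflen
            simp only [List.length_cons] at hfuel hflen
            omega
          exact ih rest'' f' (j + (c :: fwsRun us').length + 1) _ j hlen' hfuel' hrest'

-- whole-program version: A equals the guarded unit loop
theorem fws_A_eq_G (data : List Int) (min_len : Int) :
    find_wide_strings data min_len = fws_loopG min_len (fws_units data) 0 [] [] 0 := by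
  unfold find_wide_strings
  have hfuel : (fws_units data).length < data.length + 1 := by
    rw [fws_units_length]; omega
  have := fws_main data min_len (fws_units data).length (fws_units data) (data.length + 1) 0 [] 0
    (le_refl _) hfuel (by simp)
  simpa using this

-- when no break is reached with min_len ≤ 0, the guard never fires: G = B's loop
theorem fws_G_eq_B (min_len : Int) :
    ∀ (units : List (Option Char)) (j : Nat) (out : List (Int × String))
      (run : List Char) (start : Nat), (min_len ≤ 0 → none ∉ units) →
      fws_loopG min_len units j out run start = fws_loop min_len units j out run start := by
  intro units
  induction units with
  | nil => intro j out run start _; rfl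
  | cons u rest ih =>
    intro j out run start h
    cases u with
    | some c =>
      have h' : min_len ≤ 0 → none ∉ rest := fun hm hmem => h hm (List.mem_cons_of_mem _ hmem)
      simp only [fws_loopG, fws_loop]
      by_cases hr : run = [] <;> simp [hr, ih _ _ _ _ h']
    | none =>
      have hml : ¬ min_len ≤ 0 := fun hm => (h hm) List.mem_cons_self
      have h' : min_len ≤ 0 → none ∉ rest := fun hm => absurd hm hml
      simp only [fws_loopG, fws_loop, if_neg hml]
      exact ih _ _ _ _ h'

-- a unit is a break exactly when D_'s pair condition holds there
theorem fws_decode_eq_none (data : List Int) (j : Nat) :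
    fws_decode data j = none
      ↔ (data.getD (2 * j + 1) 0 ≠ 0 ∨ data.getD (2 * j) 0 ≤ 31 ∨ 127 ≤ data.getD (2 * j) 0) := by
  have hiff : (data.getD (2 * j + 1) 0 ≠ 0 ∨ data.getD (2 * j) 0 ≤ 31 ∨ 127 ≤ data.getD (2 * j) 0)
      ↔ ¬(data.getD (2 * j + 1) 0 = 0 ∧ 32 ≤ data.getD (2 * j) 0 ∧ data.getD (2 * j) 0 < 127) := by
    omega
  rw [hiff]
  by_cases h : data.getD (2 * j + 1) 0 = 0 ∧ 32 ≤ data.getD (2 * j) 0 ∧ data.getD (2 * j) 0 < 127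
  · simp [fws_decode, h]
  · simp [fws_decode, h]

-- D_'s existential is exactly: the decoded unit list contains a break
theorem fws_D_iff_none_mem (data : List Int) :
    (∃ j ∈ List.range (data.length / 2),
        data.getD (2 * j + 1) 0 ≠ 0 ∨ data.getD (2 * j) 0 ≤ 31 ∨ 127 ≤ data.getD (2 * j) 0)
      ↔ none ∈ fws_units data := by
  simp only [fws_units, List.mem_map, List.mem_range]
  constructor
  · rintro ⟨j, hj, hc⟩
    exact ⟨j, hj, (fws_decode_eq_none data j).mpr hc⟩
  · rintro ⟨j, hj, hd⟩
    exact ⟨j, hj, (fws_decode_eq_none data j).mp hd⟩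

-- a nonempty char list never renders as the empty string
theorem fws_ofList_ne_empty (run : List Char) (h : run ≠ []) : String.ofList run ≠ "" := by
  intro hcon
  apply h
  have := congrArg String.toList hcon
  rw [String.toList_ofList] at this
  simpa using this

-- B's loop never emits an empty string (beyond what the accumulator already holds)
theorem fws_B_no_empty (min_len : Int) :
    ∀ (units : List (Option Char)) (j : Nat) (out : List (Int × String))
      (run : List Char) (start : Nat) (p : Int × String),
      (∀ q ∈ out, q.2 ≠ "") → p ∈ fws_loop min_len units j out run start → p.2 ≠ "" := by
  intro units
  induction units with
  | nil =>
    intro j out run start p hout hp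
    simp only [fws_loop] at hp
    split_ifs at hp with h
    · rcases List.mem_append.mp hp with h1 | h1
      · exact hout p h1
      · simp only [List.mem_singleton] at h1
        rw [h1]
        exact fws_ofList_ne_empty run h.1
    · exact hout p hp
  | cons u rest ih =>
    intro j out run start p hout hp
    cases u with
    | some c =>
      simp only [fws_loop] at hp
      split_ifs at hp <;> exact ih _ _ _ _ p hout hp
    | none =>
      simp only [fws_loop] at hp
      refine ih _ _ _ _ p ?_ hp
      intro q hq
      split_ifs at hq with h
      · rcases List.mem_append.mp hq with h1 | h1
        · exact hout q h1
        · simp only [List.mem_singleton] at h1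
          rw [h1]
          exact fws_ofList_ne_empty run h.1
      · exact hout q hq

-- the guarded loop only grows its accumulator
theorem fws_G_mono (min_len : Int) :
    ∀ (units : List (Option Char)) (j : Nat) (out : List (Int × String))
      (run : List Char) (start : Nat) (p : Int × String),
      p ∈ out → p ∈ fws_loopG min_len units j out run start := by
  intro units
  induction units with
  | nil =>
    intro j out run start p hp
    simp only [fws_loopG]
    split_ifs <;> simp [hp]
  | cons u rest ih =>
    intro j out run start p hp
    cases u with
    | some c =>
      simp only [fws_loopG]
      split_ifs <;> exact ih _ _ _ _ p hp
    | none =>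
      simp only [fws_loopG]
      refine ih _ _ _ _ p ?_
      split_ifs <;> simp [hp]

-- with min_len ≤ 0 and a break in the units, the guarded loop emits an empty string
theorem fws_G_has_empty (min_len : Int) (hml : min_len ≤ 0) :
    ∀ (units : List (Option Char)) (j : Nat) (out : List (Int × String))
      (run : List Char) (start : Nat), none ∈ units →
      ∃ p ∈ fws_loopG min_len units j out run start, p.2 = "" := by
  intro units
  induction units with
  | nil => intro j out run start h; simp at h
  | cons u rest ih =>
    intro j out run start h
    cases u with
    | some c =>
      have hmem : none ∈ rest := by simpa using h
      simp only [fws_loopG]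
      split_ifs <;> exact ih _ _ _ _ hmem
    | none =>
      simp only [fws_loopG, if_pos hml]
      refine ⟨(((2 * j : Nat) : Int), ""), ?_, rfl⟩
      exact fws_G_mono min_len rest _ _ [] start _ (by simp)

-- ===== VERDICT (by name: the statements are the Claim_ definitions above) =====
theorem find_wide_strings_spec : Claim_unchanged_find_wide_strings := by
  intro data min_len _ hnd
  rw [fws_A_eq_G, find_wide_strings_alt]
  refine fws_G_eq_B min_len (fws_units data) 0 [] [] 0 ?_
  intro hml hmem
  exact hnd ⟨hml, (fws_D_iff_none_mem data).mpr hmem⟩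

theorem find_wide_strings_changed : Claim_changed_find_wide_strings := by
  unfold Claim_changed_find_wide_strings
  decide

theorem find_wide_strings_tight : Claim_exact_find_wide_strings := by
  intro data min_len _ hd heq
  obtain ⟨hml, hex⟩ := hd
  have hmem : none ∈ fws_units data := (fws_D_iff_none_mem data).mp hex
  have hA := fws_A_eq_G data min_len
  obtain ⟨p, hp, hp2⟩ := fws_G_has_empty min_len hml (fws_units data) 0 [] [] 0 hmem
  rw [← hA, heq] at hp
  exact fws_B_no_empty min_len (fws_units data) 0 [] [] 0 p (by simp) hp hp2
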